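-- pv_equiv track=rewrite | github.com/MrShashankagrawal/Coding-Problems | placement /accenture/02_xor.py | bn
-- ===== SOURCE A (Python) =====
-- def bn(s):
--     a = int(s[0])
--     i = 1
--     while i<len(s):
--         if s[i] == "A":
--             a&=int(s[i+1])
--         elif s[i] == "B":
--             a|=int(s[i+1])
--         elif s[i]=="C":
--             a^=int(s[i+1])
--         i+=2
--     return a
-- ===== SOURCE B (Python) =====
-- def bn(s):
--     # Different algorithm: over 4-bit words (all values here are decimal digits),
--     # each operation a&d, a|d, a^d is an affine map  a -> (a & m) ^ x,  and such
--     # maps are closed under composition.  Compose the whole operation sequence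
--     # into a single (m, x) pair without touching the initial value, then apply
--     # the composed map once to int(s[0]).
--     m, x = 15, 0
--     for i in range(1, len(s) - 1, 2):
--         op = s[i]
--         if op == 'A':        # a & d  ==  (a & d) ^ 0
--             d = int(s[i + 1])
--             m, x = m & d, x & d
--         elif op == 'B':      # a | d  ==  (a & ~d) ^ d   (~d within 4 bits)
--             d = int(s[i + 1])
--             nd = 15 ^ d
--             m, x = m & nd, (x & nd) | d
--         elif op == 'C':      # a ^ d  ==  (a & 1111b) ^ d
--             x ^= int(s[i + 1])
--     return (int(s[0]) & m) ^ x
-- ===== Notes on version B (the rewrite author's own statement) =====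
-- stated objective: alternative
-- what changed: Instead of folding the operations into the running value, B observes that every step a&d, a|d, a^d is an affine map a -> (a & m) ^ x on 4-bit words (all operands are single decimal digits) and such maps compose; it folds the (m, x) transfer function over the operator sequence without touching the initial value, then applies the composed map once to int(s[0]).
import Mathlib
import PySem

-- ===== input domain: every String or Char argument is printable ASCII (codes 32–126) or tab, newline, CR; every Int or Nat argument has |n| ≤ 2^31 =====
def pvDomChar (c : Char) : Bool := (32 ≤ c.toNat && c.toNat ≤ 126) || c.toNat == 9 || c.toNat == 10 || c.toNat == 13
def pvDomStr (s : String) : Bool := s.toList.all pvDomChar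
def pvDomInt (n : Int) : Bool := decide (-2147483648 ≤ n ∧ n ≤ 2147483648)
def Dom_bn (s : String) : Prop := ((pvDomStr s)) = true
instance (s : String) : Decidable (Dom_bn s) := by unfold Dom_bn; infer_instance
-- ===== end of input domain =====

-- B uses a different algorithm: it composes the whole operator sequence into one
-- affine map a ↦ (a & m) ^ x over 4-bit words and applies it once to int(s[0]).

-- ===== PORT A =====
-- int("<c>") for a single char: exact on digit chars; Pre_bn guarantees only digits reach it
def pvDig (c : Char) : Int := (c.toNat : Int) - 48
-- s[i+1] as a digit; the [] case is an IndexError in Python, excluded by Pre_bn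
def pvHeadDig : List Char → Int
  | [] => 0
  | d :: _ => pvDig d

def bnGo : List Char → Int → Int
  | [], a => a
  | c :: rest, a =>
    if c = 'A' then bnGo rest.tail (Int.land a (pvHeadDig rest))
    else if c = 'B' then bnGo rest.tail (Int.lor a (pvHeadDig rest))
    else if c = 'C' then bnGo rest.tail (Int.xor a (pvHeadDig rest))
    else bnGo rest.tail a
termination_by cs _ => cs.length
decreasing_by all_goals (simp [List.length_tail]; try omega)

def bn (s : String) : Int :=
  match s.toList with
  | [] => 0                      -- IndexError in Python, excluded by Pre_bn
  | c :: rest => bnGo rest (pvDig c)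

-- ===== PORT B =====
-- the loop 'for i in range(1, len(s)-1, 2)' on the tail of the char list:
-- fold the (m, x) affine state over each (op, operand) step; a trailing lone
-- char (i = len(s)-1) is never visited, matching the range bound
def pvComp : List Char → Int → Int → Int × Int
  | c :: d :: rest, m, x =>
    if c = 'A' then pvComp rest (Int.land m (pvDig d)) (Int.land x (pvDig d))
    else if c = 'B' then
      pvComp rest (Int.land m (Int.xor 15 (pvDig d)))
                  (Int.lor (Int.land x (Int.xor 15 (pvDig d))) (pvDig d))
    else if c = 'C' then pvComp rest m (Int.xor x (pvDig d))
    else pvComp rest m x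
  | _, m, x => (m, x)

def bn_alt (s : String) : Int :=
  match s.toList with
  | [] => 0                      -- IndexError in Python, excluded by Pre_bn
  | c :: rest =>
    let mx := pvComp rest 15 0
    Int.xor (Int.land (pvDig c) mx.1) mx.2

-- ===== PRECONDITION & SPEC =====
def pvIsOp (c : Char) : Bool := c == 'A' || c == 'B' || c == 'C'

-- every operator at an odd position has a digit operand after it (else int raises /
-- IndexError); checked pairwise along the tail
def pvPreRest : List Char → Bool
  | [] => true
  | [c] => !(pvIsOp c)
  | c :: d :: rest => (!(pvIsOp c) || d.isDigit) && pvPreRest rest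

-- exactly the inputs where A returns: nonempty, s[0] a digit, and every operator
-- char at an odd position is followed by a digit operand
def Pre_bn (s : String) : Prop :=
  (match s.toList with
   | [] => false
   | c :: rest => c.isDigit && pvPreRest rest) = true
instance (s : String) : Decidable (Pre_bn s) := by unfold Pre_bn; infer_instance

def pvWitness_bn : String := "5A7B3C2x_"

def Spec_bn (s : String) (out : Int) : Prop := out = bn_alt s
instance (s : String) (out : Int) : Decidable (Spec_bn s out) := by unfold Spec_bn; infer_instance

-- ===== CLAIM (what is proved, stated in full; the proofs are below) =====
def Claim_equal_bn : Prop := ∀ (s : String), Dom_bn s → Pre_bn s → Spec_bn s (bn s)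

-- ===== LEMMAS AND PROOFS =====

-- casts between Int bitwise ops and Nat bitwise ops on nonnegative values
theorem land_cast (a b : Nat) : Int.land (a : Int) (b : Int) = ((a &&& b : Nat) : Int) := rfl
theorem lor_cast (a b : Nat) : Int.lor (a : Int) (b : Int) = ((a ||| b : Nat) : Int) := rfl
theorem xor_cast (a b : Nat) : Int.xor (a : Int) (b : Int) = ((a ^^^ b : Nat) : Int) := rfl

-- a digit char is a Nat < 10 after int()
theorem dig_cast (c : Char) (h : c.isDigit = true) :
    pvDig c = ((c.toNat - 48 : Nat) : Int) ∧ c.toNat - 48 < 10 := by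
  have hb : 48 ≤ c.toNat ∧ c.toNat ≤ 57 := by
    simp [Char.isDigit] at h; exact ⟨h.1, h.2⟩
  refine ⟨?_, by omega⟩
  unfold pvDig; omega

-- bounded 4-bit facts, decided over the finite range
theorem or_via_and_xor : ∀ p < 16, ∀ d < 16, p ||| d = (p &&& (15 ^^^ d)) ^^^ d := by decide
theorem disj_or_eq_xor : ∀ x < 16, ∀ d < 16, (x &&& (15 ^^^ d)) ||| d = (x &&& (15 ^^^ d)) ^^^ d := by decide
theorem or_lt_16 : ∀ x < 16, ∀ d < 16, x ||| d < 16 := by decide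
theorem xor_lt_16 : ∀ x < 16, ∀ d < 16, x ^^^ d < 16 := by decide
theorem and_15_self : ∀ k < 16, k &&& 15 = k := by decide

theorem and_le_right (a m : Nat) : a &&& m ≤ m := Nat.and_le_right

-- the key invariant: applying the composed affine map equals running A's fold
theorem comp_invariant : ∀ (n : Nat) (rest : List Char), rest.length ≤ n →
    pvPreRest rest = true → ∀ (a m x : Nat), a < 16 → m < 16 → x < 16 →
    bnGo rest (Int.xor (Int.land (a : Int) (m : Int)) (x : Int))
      = Int.xor (Int.land (a : Int) (pvComp rest (m : Int) (x : Int)).1)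
                (pvComp rest (m : Int) (x : Int)).2 := by
  intro n
  induction n with
  | zero =>
    intro rest hn _ a m x _ _ _
    have : rest = [] := List.length_eq_zero_iff.mp (Nat.le_zero.mp hn)
    subst this; simp [bnGo, pvComp]
  | succ n ih =>
    intro rest hn hp a m x ha hm hx
    match rest with
    | [] => simp [bnGo, pvComp]
    | [c] =>
      simp [pvPreRest, pvIsOp] at hp
      obtain ⟨⟨h1, h2⟩, h3⟩ := hp
      simp [bnGo, pvComp, h1, h2, h3]
    | c :: d :: rest'' =>
      simp [pvPreRest] at hp
      have hlen : rest''.length ≤ n := by simp at hn; omega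
      by_cases hA : c = 'A'
      · have hd := hp.1.resolve_left (by simp [hA, pvIsOp])
        obtain ⟨hde, hdl⟩ := dig_cast d hd
        set k := d.toNat - 48 with hk
        subst hA
        simp only [bnGo, pvComp, List.tail_cons, pvHeadDig, hde,
          land_cast, lor_cast, xor_cast]
        rw [show ((a &&& m) ^^^ x) &&& k = (a &&& (m &&& k)) ^^^ (x &&& k) from by
          rw [Nat.and_xor_distrib_right, Nat.and_assoc]]
        exact ih rest'' hlen hp.2 a (m &&& k) (x &&& k)
          ha (lt_of_le_of_lt (and_le_right m k) (by omega))
          (lt_of_le_of_lt (and_le_right x k) (by omega))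
      · by_cases hB : c = 'B'
        · have hd := hp.1.resolve_left (by simp [hB, pvIsOp])
          obtain ⟨hde, hdl⟩ := dig_cast d hd
          set k := d.toNat - 48 with hk
          have hp16 : (a &&& m) ^^^ x < 16 :=
            xor_lt_16 _ (lt_of_le_of_lt (and_le_right a m) hm) x hx
          subst hB
          simp only [bnGo, pvComp,
            if_neg (by decide : ¬ ('B' : Char) = 'A'), List.tail_cons, pvHeadDig, hde,
            show Int.xor 15 ((k : Nat) : Int) = ((15 ^^^ k : Nat) : Int) from rfl,
            land_cast, lor_cast, xor_cast]
          rw [show ((a &&& m) ^^^ x) ||| k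
                = (a &&& (m &&& (15 ^^^ k))) ^^^ ((x &&& (15 ^^^ k)) ||| k) from by
            rw [or_via_and_xor _ hp16 k (by omega), Nat.and_xor_distrib_right,
                ← Nat.and_assoc, Nat.xor_assoc, ← disj_or_eq_xor x hx k (by omega)]]
          exact ih rest'' hlen hp.2 a (m &&& (15 ^^^ k)) ((x &&& (15 ^^^ k)) ||| k)
            ha (lt_of_le_of_lt (and_le_right m _) (xor_lt_16 15 (by omega) k (by omega)))
            (or_lt_16 _ (lt_of_le_of_lt (and_le_right x _) (xor_lt_16 15 (by omega) k (by omega)))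
              k (by omega))
        · by_cases hC : c = 'C'
          · have hd := hp.1.resolve_left (by simp [hC, pvIsOp])
            obtain ⟨hde, hdl⟩ := dig_cast d hd
            set k := d.toNat - 48 with hk
            subst hC
            simp only [bnGo, pvComp,
              if_neg (by decide : ¬ ('C' : Char) = 'A'),
              if_neg (by decide : ¬ ('C' : Char) = 'B'), List.tail_cons, pvHeadDig, hde,
              land_cast, lor_cast, xor_cast]
            rw [show ((a &&& m) ^^^ x) ^^^ k = (a &&& m) ^^^ (x ^^^ k) from
              Nat.xor_assoc _ _ _]
            exact ih rest'' hlen hp.2 a m (x ^^^ k) ha hm (xor_lt_16 x hx k (by omega))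
          · simp only [bnGo, pvComp, if_neg hA, if_neg hB, if_neg hC, List.tail_cons]
            exact ih rest'' hlen hp.2 a m x ha hm hx

-- ===== VERDICT (by name: the statement is the Claim_ definition above) =====
theorem bn_spec : Claim_equal_bn := by
  intro s _ hpre
  unfold Spec_bn bn bn_alt
  unfold Pre_bn at hpre
  cases hcs : s.toList with
  | nil => rw [hcs] at hpre; try simp at hpre
  | cons c rest =>
    rw [hcs] at hpre
    simp only [Bool.and_eq_true] at hpre
    show bnGo rest (pvDig c)
        = Int.xor (Int.land (pvDig c) (pvComp rest 15 0).1) (pvComp rest 15 0).2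
    obtain ⟨hae, hal⟩ := dig_cast c hpre.1
    set k := c.toNat - 48 with hk
    have hinv := comp_invariant rest.length rest le_rfl hpre.2 k 15 0
      (by omega) (by omega) (by omega)
    rw [land_cast, xor_cast, and_15_self k (by omega), Nat.xor_zero] at hinv
    rw [hae]; exact hinv
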